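-- pv_equiv track=rewrite | github.com/gabekao/Diacritical-Characters | src/diacritical_characters/core.py | build_sorted_index
-- ===== SOURCE A (Python) =====
-- from collections import defaultdict
-- from typing import Iterable
--
-- def build_sorted_index(words: Iterable[str]) -> dict[int, dict[str, list[str]]]:
--     temp: defaultdict[int, defaultdict[str, set[str]]] = defaultdict(lambda: defaultdict(set))
--
--     for word in words:
--         normalized = str(word).lower()
--         if not normalized:
--             continue
--         temp[len(normalized)][normalized[0]].add(normalized)
--
--     sorted_index: dict[int, dict[str, list[str]]] = {}
--     for length in sorted(temp):
--         by_initial: dict[str, list[str]] = {}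
--         for initial in sorted(temp[length]):
--             by_initial[initial] = sorted(temp[length][initial], key=str.casefold)
--         sorted_index[length] = by_initial
--     return sorted_index
-- ===== SOURCE B (Python) =====
-- def build_sorted_index(words):
--     # Normalize (str->lower), drop empties, dedup via a set.
--     uniq = {w for w in (str(word).lower() for word in words) if w}
--     # One global sort keyed by (length, word); within a length, lexicographic
--     # order refines both the initial-character order and the casefold order
--     # for already-lowercased words.
--     flat = sorted(uniq, key=lambda w: (len(w), w))
--     # One pass over the sorted flat list builds the nested index directly.
--     index = {}
--     for w in flat:
--         index.setdefault(len(w), {}).setdefault(w[0], []).append(w)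
--     return index
-- ===== Notes on version B (the rewrite author's own statement) =====
-- stated objective: alternative
-- what changed: Replaces the nested defaultdict-of-sets bucketing followed by three levels of per-bucket sorting with: dedup once into a set, one global sort keyed by (length, word), then a single linear pass over the sorted list that builds the nested dict with setdefault.
import Mathlib
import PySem

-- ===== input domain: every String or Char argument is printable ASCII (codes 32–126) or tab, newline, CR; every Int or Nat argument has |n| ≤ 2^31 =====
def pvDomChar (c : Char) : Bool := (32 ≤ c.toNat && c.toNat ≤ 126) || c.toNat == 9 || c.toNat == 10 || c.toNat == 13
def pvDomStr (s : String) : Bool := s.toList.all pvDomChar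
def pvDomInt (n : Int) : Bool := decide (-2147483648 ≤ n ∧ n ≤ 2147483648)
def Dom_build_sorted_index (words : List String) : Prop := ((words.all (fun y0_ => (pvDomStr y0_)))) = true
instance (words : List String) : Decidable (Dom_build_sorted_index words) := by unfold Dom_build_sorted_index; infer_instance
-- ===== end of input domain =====

-- B replaces A's nested defaultdict-of-sets bucketing plus per-bucket sorting by one global
-- sort keyed by (length, word) followed by a single linear pass (alternative decomposition,
-- same asymptotic cost).

-- ===== PORT A =====
-- 'key=str.casefold' is ported as PySem.Str.lower: on lowercased strings of the task's ASCII
-- domain casefold and lower coincide (exact on Dom).  'normalized[0]' (a one-character string)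
-- is ported as String.ofList (·.toList.take 1); it is only evaluated under the guard
-- normalized ≠ "", where this is exact.
def build_sorted_index (words : List String) : List (Int × List (String × List String)) :=
  let temp : PySem.Dict Int (PySem.Dict String (PySem.Set String)) :=
    words.foldl (fun temp word =>
      let normalized := PySem.Str.lower word
      if normalized = "" then temp
      else
        temp.insert (PySem.Str.len normalized)
          ((temp.getD (PySem.Str.len normalized) PySem.Dict.empty).insert
            (String.ofList (normalized.toList.take 1))
            (PySem.Set.add
              ((temp.getD (PySem.Str.len normalized) PySem.Dict.empty).getD
                (String.ofList (normalized.toList.take 1)) PySem.Set.empty)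
              normalized)))
      PySem.Dict.empty
  let sorted_index : PySem.Dict Int (PySem.Dict String (List String)) :=
    (PySem.List.sorted temp.keys (fun x => x) false).foldl (fun si length =>
      si.insert length
        ((PySem.List.sorted (temp.getD length PySem.Dict.empty).keys (fun x => x) false).foldl
          (fun bi initial =>
            bi.insert initial
              (PySem.List.sorted
                ((temp.getD length PySem.Dict.empty).getD initial PySem.Set.empty)
                (fun w => PySem.Str.lower w) false))
          PySem.Dict.empty))
      PySem.Dict.empty
  sorted_index.items.map (fun p => (p.1, p.2.items))

-- ===== PORT B =====
-- 'w[0]' is ported as String.ofList (·.toList.take 1); every element of flat is nonempty, where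
-- this is exact.  The (len(w), w) sort key is PySem.List.sorted2.
def build_sorted_index_alt (words : List String) : List (Int × List (String × List String)) :=
  let uniq : PySem.Set String :=
    PySem.Set.ofList ((words.map (fun word => PySem.Str.lower word)).filter
      (fun w => decide (w ≠ "")))
  let flat := PySem.List.sorted2 uniq (fun w => PySem.Str.len w) (fun w => w) false
  let index : PySem.Dict Int (PySem.Dict String (List String)) :=
    flat.foldl (fun index w =>
      index.insert (PySem.Str.len w)
        ((index.getD (PySem.Str.len w) PySem.Dict.empty).insert
          (String.ofList (w.toList.take 1))
          (((index.getD (PySem.Str.len w) PySem.Dict.empty).getD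
              (String.ofList (w.toList.take 1)) []) ++ [w])))
      PySem.Dict.empty
  index.items.map (fun p => (p.1, p.2.items))

-- ===== PRECONDITION & SPEC =====
def Spec_build_sorted_index (words : List String) (out : List (Int × List (String × List String))) : Prop := out = build_sorted_index_alt words
instance (words : List String) (out : List (Int × List (String × List String))) : Decidable (Spec_build_sorted_index words out) := by unfold Spec_build_sorted_index; infer_instance

-- ===== CLAIM (what is proved, stated in full; the proofs are below) =====
def Claim_equal_build_sorted_index : Prop := ∀ (words : List String), Dom_build_sorted_index words → Spec_build_sorted_index words (build_sorted_index words)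

-- ===== LEMMAS AND PROOFS =====

def lenK (w : String) : Int := PySem.Str.len w
def iniK (w : String) : String := String.ofList (w.toList.take 1)
def nws (words : List String) : List String :=
  (words.map (fun word => PySem.Str.lower word)).filter (fun w => decide (w ≠ ""))
def lensOf (ws : List String) : List Int :=
  PySem.List.sorted (PySem.Set.ofList (ws.map lenK)) (fun x => x) false
def inisOf (ws : List String) (L : Int) : List String :=
  PySem.List.sorted
    (PySem.Set.ofList ((ws.filter (fun w => lenK w == L)).map iniK)) (fun x => x) false
def bucketOf (ws : List String) (L : Int) (c : String) : List String :=
  PySem.List.sorted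
    (PySem.Set.ofList ((ws.filter (fun w => lenK w == L)).filter (fun w => iniK w == c)))
    (fun x => x) false
def canon (ws : List String) : List (Int × List (String × List String)) :=
  (lensOf ws).map (fun L => (L, (inisOf ws L).map (fun c => (c, bucketOf ws L c))))

theorem getD_foldl_insert_key_filter {κ ν β : Type} [BEq κ] [LawfulBEq κ]
    (l : List β) (key : β → κ) (f : ν → β → ν) (dflt : ν) (d : PySem.Dict κ ν) (k : κ) :
    (l.foldl (fun d x => d.insert (key x) (f (d.getD (key x) dflt) x)) d).getD k dflt
      = (l.filter (fun x => key x == k)).foldl f (d.getD k dflt) := by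
  induction l generalizing d with
  | nil => rfl
  | cons x t ih =>
    simp only [List.foldl_cons, List.filter_cons]
    by_cases h : key x = k
    · subst h
      simp only [BEq.rfl, if_pos, List.foldl_cons, ih, PySem.Dict.getD_insert_self]
    · have hb : (key x == k) = false := by simp [h]
      simp only [hb, Bool.false_eq_true, if_false, ih,
        PySem.Dict.getD_insert_of_ne _ _ _ (fun hc => h hc.symm)]

-- every element of xs equals a, xs nonempty => ofList xs = [a]
theorem ofList_const {α : Type} [BEq α] [LawfulBEq α] (xs : List α) (a : α)
    (hne : xs ≠ []) (hall : ∀ x ∈ xs, x = a) : PySem.Set.ofList xs = [a] := by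
  induction xs with
  | nil => exact absurd rfl hne
  | cons x t ih =>
    have hx : x = a := hall x List.mem_cons_self
    subst hx
    rw [PySem.Set.ofList_cons]
    cases t with
    | nil => rfl
    | cons y s =>
      rw [ih (by simp) (fun z hz => hall z (List.mem_cons_of_mem _ hz))]
      simp [PySem.Set.discard]

theorem ofList_map_key_flatMap {α κ : Type} [BEq κ] [LawfulBEq κ]
    (Ls : List κ) (f : κ → List α) (key : α → κ)
    (hnd : Ls.Nodup) (hne : ∀ L ∈ Ls, f L ≠ [])
    (hkey : ∀ L ∈ Ls, ∀ x ∈ f L, key x = L) :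
    PySem.Set.ofList ((Ls.flatMap f).map key) = Ls := by
  induction Ls with
  | nil => rfl
  | cons L Ls ih =>
    rw [List.flatMap_cons, List.map_append, PySem.Set.ofList_append,
      ofList_const ((f L).map key) L (by simpa using hne L List.mem_cons_self)
        (by rintro x hx; obtain ⟨y, hy, rfl⟩ := List.mem_map.mp hx
            exact hkey L List.mem_cons_self y hy),
      PySem.Set.update_eq_append_filter,
      ih hnd.of_cons (fun L' h => hne L' (List.mem_cons_of_mem _ h))
        (fun L' h => hkey L' (List.mem_cons_of_mem _ h))]
    have : ∀ y ∈ Ls, (!PySem.Set.contains [L] y) = true := by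
      intro y hy
      have : y ≠ L := fun hc => (List.nodup_cons.mp hnd).1 (hc ▸ hy)
      simp [PySem.Set.contains, this]
    rw [List.filter_eq_self.mpr this]
    rfl

theorem filter_flatMap_groups {α κ : Type} [BEq κ] [LawfulBEq κ] [DecidableEq κ]
    (Ls : List κ) (f : κ → List α) (key : α → κ) (k : κ)
    (hnd : Ls.Nodup) (hkey : ∀ L ∈ Ls, ∀ x ∈ f L, key x = L) (hk : k ∈ Ls) :
    (Ls.flatMap f).filter (fun x => key x == k) = f k := by
  induction Ls with
  | nil => exact absurd hk (List.not_mem_nil)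
  | cons L Ls ih =>
    rw [List.flatMap_cons, List.filter_append]
    rcases List.mem_cons.mp hk with rfl | hk'
    · have h1 : (f k).filter (fun x => key x == k) = f k :=
        List.filter_eq_self.mpr (fun x hx => by
          simp [hkey k List.mem_cons_self x hx])
      have h2 : (Ls.flatMap f).filter (fun x => key x == k) = [] := by
        apply List.filter_eq_nil_iff.mpr
        intro x hx
        obtain ⟨L', hL', hxL'⟩ := List.mem_flatMap.mp hx
        have : key x = L' := hkey L' (List.mem_cons_of_mem _ hL') x hxL'
        have hne : L' ≠ k := fun hc => (List.nodup_cons.mp hnd).1 (hc ▸ hL')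
        simp [this, hne]
      rw [h1, h2, List.append_nil]
    · have h1 : (f L).filter (fun x => key x == k) = [] := by
        apply List.filter_eq_nil_iff.mpr
        intro x hx
        have : key x = L := hkey L List.mem_cons_self x hx
        have hne : L ≠ k := fun hc => (List.nodup_cons.mp hnd).1 (hc ▸ hk')
        simp [this, hne]
      rw [h1, List.nil_append,
        ih hnd.of_cons (fun L' h => hkey L' (List.mem_cons_of_mem _ h)) hk']

theorem nodup_sorted_ofList {α : Type} [LinearOrder α] [BEq α] [LawfulBEq α] (xs : List α) :
    (PySem.List.sorted (PySem.Set.ofList xs) (fun x => x) false).Nodup :=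
  (PySem.List.sorted_ofList_pairwise_lt xs).imp ne_of_lt

theorem lowerChar_idem (c : Char) :
    PySem.Chars.lowerChar (PySem.Chars.lowerChar c) = PySem.Chars.lowerChar c := by
  unfold PySem.Chars.lowerChar PySem.Chars.isupper
  by_cases h : 'A' ≤ c ∧ c ≤ 'Z'
  · have h1 : 65 ≤ c.toNat ∧ c.toNat ≤ 90 := by
      have ha : ('A':Char) ≤ c := h.1
      have hb : c ≤ ('Z':Char) := h.2
      rw [Char.le_def, UInt32.le_iff_toNat_le] at ha hb
      exact ⟨ha, hb⟩
    have htn : (Char.ofNat (c.toNat + 32)).toNat = c.toNat + 32 := by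
      rw [Char.toNat_ofNat, if_pos (Or.inl (by omega))]
    have hc1 : (decide ('A' ≤ c) && decide (c ≤ 'Z')) = true := by simp [h.1, h.2]
    rw [if_pos hc1]
    have hfalse : ¬ ((decide ('A' ≤ Char.ofNat (c.toNat + 32)) && decide (Char.ofNat (c.toNat + 32) ≤ 'Z')) = true) := by
      intro hc
      simp only [Bool.and_eq_true, decide_eq_true_eq] at hc
      have h2 := hc.2
      rw [Char.le_def, UInt32.le_iff_toNat_le] at h2
      have hz : ('Z':Char).val.toNat = 90 := rfl
      rw [hz] at h2
      have : (Char.ofNat (c.toNat + 32)).val.toNat = c.toNat + 32 := htn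
      omega
    rw [if_neg hfalse]
  · have hc1 : ¬ ((decide ('A' ≤ c) && decide (c ≤ 'Z')) = true) := by
      intro hc; simp only [Bool.and_eq_true, decide_eq_true_eq] at hc; exact h hc
    rw [if_neg hc1, if_neg hc1]

theorem lower_idem (s : String) : PySem.Str.lower (PySem.Str.lower s) = PySem.Str.lower s := by
  have h : (PySem.Str.lower (PySem.Str.lower s)).toList = (PySem.Str.lower s).toList := by
    simp only [PySem.Str.toList_lower, PySem.Chars.lower, List.map_map]
    exact List.map_congr_left (fun c _ => lowerChar_idem c)
  calc PySem.Str.lower (PySem.Str.lower s)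
      = String.ofList (PySem.Str.lower (PySem.Str.lower s)).toList := String.ofList_toList.symm
    _ = String.ofList (PySem.Str.lower s).toList := by rw [h]
    _ = PySem.Str.lower s := String.ofList_toList

theorem mem_nws_lower {words : List String} {w : String} (h : w ∈ nws words) :
    PySem.Str.lower w = w := by
  obtain ⟨hm, _⟩ := List.mem_filter.mp h
  obtain ⟨orig, _, rfl⟩ := List.mem_map.mp hm
  exact lower_idem orig

theorem mem_nws_ne {words : List String} {w : String} (h : w ∈ nws words) : w ≠ "" := by
  have := (List.mem_filter.mp h).2
  simpa using this

-- the sorted bucket under the casefold key equals the plainly sorted bucket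
theorem sorted_lower_eq_sorted_id (xs : List String) (hl : ∀ w ∈ xs, PySem.Str.lower w = w) :
    PySem.List.sorted (PySem.Set.ofList xs) (fun w => PySem.Str.lower w) false
      = PySem.List.sorted (PySem.Set.ofList xs) (fun w => w) false := by
  apply PySem.List.sorted_eq_of_perm_of_pairwise_lt
  · exact PySem.List.sorted_perm _ _ _
  · apply (PySem.List.sorted_ofList_pairwise_lt xs).imp_of_mem
    intro a b ha hb hab
    have ha' := hl a ((PySem.List.sorted_perm _ _ _).mem_iff.mp ha |> (PySem.Set.mem_ofList _ _).mp)
    have hb' := hl b ((PySem.List.sorted_perm _ _ _).mem_iff.mp hb |> (PySem.Set.mem_ofList _ _).mp)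
    rw [ha', hb']
    exact hab

def gA2 (inner : PySem.Dict String (PySem.Set String)) (n : String) :
    PySem.Dict String (PySem.Set String) :=
  inner.insert (iniK n) (PySem.Set.add (inner.getD (iniK n) PySem.Set.empty) n)

def gA (temp : PySem.Dict Int (PySem.Dict String (PySem.Set String))) (n : String) :
    PySem.Dict Int (PySem.Dict String (PySem.Set String)) :=
  temp.insert (lenK n) (gA2 (temp.getD (lenK n) PySem.Dict.empty) n)

def tempOf (ws : List String) : PySem.Dict Int (PySem.Dict String (PySem.Set String)) :=
  ws.foldl gA PySem.Dict.empty

theorem tempA_eq (words : List String) :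
    words.foldl (fun temp word =>
      let normalized := PySem.Str.lower word
      if normalized = "" then temp
      else
        temp.insert (PySem.Str.len normalized)
          ((temp.getD (PySem.Str.len normalized) PySem.Dict.empty).insert
            (String.ofList (normalized.toList.take 1))
            (PySem.Set.add
              ((temp.getD (PySem.Str.len normalized) PySem.Dict.empty).getD
                (String.ofList (normalized.toList.take 1)) PySem.Set.empty)
              normalized)))
      PySem.Dict.empty = tempOf (nws words) := by
  show words.foldl (fun temp word =>
      (fun t n => if n = "" then t else gA t n) temp (PySem.Str.lower word)) PySem.Dict.empty = _
  rw [← List.foldl_map (f := fun w => PySem.Str.lower w) (g := fun t n => if n = "" then t else gA t n)]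
  have hswap : (fun (t : PySem.Dict Int (PySem.Dict String (PySem.Set String))) n =>
      if n = "" then t else gA t n) = (fun t n => if n ≠ "" then gA t n else t) := by
    funext t n
    by_cases h : n = "" <;> simp [h]
  rw [hswap, PySem.List.foldl_ite_eq_foldl_filter]
  rfl

theorem tempOf_getD (ws : List String) (L : Int) :
    (tempOf ws).getD L PySem.Dict.empty
      = (ws.filter (fun w => lenK w == L)).foldl gA2 PySem.Dict.empty := by
  unfold tempOf gA
  rw [getD_foldl_insert_key_filter ws lenK gA2 PySem.Dict.empty PySem.Dict.empty L,
    PySem.Dict.getD_empty]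

theorem tempOf_keys (ws : List String) :
    (tempOf ws).keys = PySem.Set.ofList (ws.map lenK) := by
  unfold tempOf gA
  rw [PySem.Dict.keys_foldl_insert_key ws lenK
    (fun d n => gA2 (d.getD (lenK n) PySem.Dict.empty) n) PySem.Dict.empty]
  rfl

theorem innerOf_keys (ws : List String) (L : Int) :
    ((ws.filter (fun w => lenK w == L)).foldl gA2 PySem.Dict.empty).keys
      = PySem.Set.ofList ((ws.filter (fun w => lenK w == L)).map iniK) := by
  unfold gA2
  rw [PySem.Dict.keys_foldl_insert_key _ iniK
    (fun d n => PySem.Set.add (d.getD (iniK n) PySem.Set.empty) n) PySem.Dict.empty]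
  rfl

theorem innerOf_getD (ws : List String) (L : Int) (c : String) :
    ((ws.filter (fun w => lenK w == L)).foldl gA2 PySem.Dict.empty).getD c PySem.Set.empty
      = PySem.Set.ofList
          ((ws.filter (fun w => lenK w == L)).filter (fun w => iniK w == c)) := by
  unfold gA2
  rw [getD_foldl_insert_key_filter _ iniK
    (fun s n => PySem.Set.add s n) PySem.Set.empty PySem.Dict.empty c,
    PySem.Dict.getD_empty]
  rw [PySem.Set.ofList_eq_foldl]
  rfl

theorem A_eq_canon (words : List String) : build_sorted_index words = canon (nws words) := by
  simp only [build_sorted_index]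
  rw [tempA_eq words]
  have hsortkeys : PySem.List.sorted (tempOf (nws words)).keys (fun x => x) false
      = lensOf (nws words) := by rw [tempOf_keys]; rfl
  rw [hsortkeys]
  have houter := PySem.Dict.items_foldl_insert_fresh (lensOf (nws words))
    (fun a => a)
    (fun length => (PySem.List.sorted ((tempOf (nws words)).getD length PySem.Dict.empty).keys
        (fun x => x) false).foldl
      (fun bi initial =>
        bi.insert initial
          (PySem.List.sorted (((tempOf (nws words)).getD length PySem.Dict.empty).getD initial
            PySem.Set.empty) (fun w => PySem.Str.lower w) false))
      PySem.Dict.empty)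
    PySem.Dict.empty
    (fun a _ => PySem.Dict.contains_empty a)
    (by simpa [lensOf] using nodup_sorted_ofList ((nws words).map lenK))
  rw [houter]
  have hempty : (PySem.Dict.empty : PySem.Dict Int (PySem.Dict String (List String))).items = [] := rfl
  rw [hempty, List.nil_append, List.map_map]
  unfold canon
  apply List.map_congr_left
  intro L hL
  simp only [Function.comp]
  refine congrArg (fun z => (L, z)) ?_
  have hsortinner : PySem.List.sorted ((tempOf (nws words)).getD L PySem.Dict.empty).keys
      (fun x => x) false = inisOf (nws words) L := by
    rw [tempOf_getD, innerOf_keys]; rfl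
  rw [hsortinner]
  have hinner := PySem.Dict.items_foldl_insert_fresh (inisOf (nws words) L)
    (fun a => a)
    (fun initial => PySem.List.sorted (((tempOf (nws words)).getD L PySem.Dict.empty).getD initial
        PySem.Set.empty) (fun w => PySem.Str.lower w) false)
    PySem.Dict.empty
    (fun a _ => PySem.Dict.contains_empty a)
    (by simpa [inisOf] using nodup_sorted_ofList (((nws words).filter (fun w => lenK w == L)).map iniK))
  rw [hinner]
  have hempty2 : (PySem.Dict.empty : PySem.Dict String (List String)).items = [] := rfl
  rw [hempty2, List.nil_append]
  apply List.map_congr_left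
  intro c hc
  refine congrArg (fun z => (c, z)) ?_
  beta_reduce
  rw [tempOf_getD, innerOf_getD]
  unfold bucketOf
  apply sorted_lower_eq_sorted_id
  intro w hw
  exact mem_nws_lower ((List.mem_filter.mp ((List.mem_filter.mp hw).1)).1)

theorem sorted2_eq_sorted_lexKey (xs : List String) :
    PySem.List.sorted2 xs (fun w => PySem.Str.len w) (fun w => w) false
      = PySem.List.sorted xs (fun w => toLex (lenK w, w)) false := by
  rw [PySem.List.sorted_eq_foldl_insertBy]
  unfold PySem.List.sorted2
  have hf : (fun a b => decide (PySem.Str.len a < PySem.Str.len b)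
        || !decide (PySem.Str.len b < PySem.Str.len a) && decide (a < b))
      = (fun a b => decide (toLex (lenK a, a) < toLex (lenK b, b))) := by
    funext a b
    have e : ∀ s : String, PySem.Str.len s = (s.length : Int) := fun s => by
      rw [PySem.Str.len_eq, String.length_toList]
    have e2 : ∀ s t : String, (lenK s < lenK t) = (s.length < t.length) := fun s t => by
      rw [lenK, lenK, e, e]; simp
    have e4 : ∀ s t : String, (lenK s = lenK t) = (s.length = t.length) := fun s t => by
      rw [lenK, lenK, e, e]; simp
    rcases lt_trichotomy a.length b.length with h1 | h1 | h1
    · simp [Prod.Lex.lt_iff, e2, e4, h1, Nat.lt_asymm h1, Nat.ne_of_lt h1]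
    · simp [Prod.Lex.lt_iff, e2, e4, h1]
    · simp [Prod.Lex.lt_iff, e2, e4, h1, Nat.lt_asymm h1, Ne.symm (Nat.ne_of_lt h1)]
  simp only [hf, Bool.false_eq_true, if_false]

theorem str_lt_of_iniK_lt (x y : String) (hx : x ≠ "") (hy : y ≠ "")
    (h : iniK x < iniK y) : x < y := by
  have hx' : x.toList ≠ [] := fun hc => hx (by
    have := congrArg String.ofList hc
    rwa [String.ofList_toList] at this)
  have hy' : y.toList ≠ [] := fun hc => hy (by
    have := congrArg String.ofList hc
    rwa [String.ofList_toList] at this)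
  unfold iniK at h
  rw [String.lt_iff_toList_lt] at h ⊢
  rw [String.toList_ofList, String.toList_ofList] at h
  obtain ⟨a, xs, hxl⟩ := List.exists_cons_of_ne_nil hx'
  obtain ⟨b, ys, hyl⟩ := List.exists_cons_of_ne_nil hy'
  rw [hxl, hyl] at h ⊢
  simp only [List.take_succ_cons, List.take_zero] at h
  rw [List.cons_lt_cons_iff] at h ⊢
  rcases h with h | ⟨rfl, h⟩
  · exact Or.inl h
  · exact absurd h (by simp)

def bigblock (ws : List String) (L : Int) : List String :=
  (inisOf ws L).flatMap (fun c => bucketOf ws L c)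

def flatC (ws : List String) : List String :=
  (lensOf ws).flatMap (fun L => bigblock ws L)

theorem mem_bucketOf {ws : List String} {L : Int} {c x : String} :
    x ∈ bucketOf ws L c ↔ x ∈ ws ∧ lenK x = L ∧ iniK x = c := by
  unfold bucketOf
  rw [(PySem.List.sorted_perm _ _ _).mem_iff, PySem.Set.mem_ofList,
    List.mem_filter, List.mem_filter]
  simp [and_assoc]

theorem mem_inisOf {ws : List String} {L : Int} {c : String} :
    c ∈ inisOf ws L ↔ ∃ w ∈ ws, lenK w = L ∧ iniK w = c := by
  unfold inisOf
  rw [(PySem.List.sorted_perm _ _ _).mem_iff, PySem.Set.mem_ofList, List.mem_map]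
  constructor
  · rintro ⟨w, hw, rfl⟩
    have := List.mem_filter.mp hw
    exact ⟨w, this.1, by simpa using this.2, rfl⟩
  · rintro ⟨w, hw, hL, rfl⟩
    exact ⟨w, List.mem_filter.mpr ⟨hw, by simpa using hL⟩, rfl⟩

theorem mem_lensOf {ws : List String} {L : Int} :
    L ∈ lensOf ws ↔ ∃ w ∈ ws, lenK w = L := by
  unfold lensOf
  rw [(PySem.List.sorted_perm _ _ _).mem_iff, PySem.Set.mem_ofList, List.mem_map]

theorem mem_bigblock {ws : List String} {L : Int} {x : String} :
    x ∈ bigblock ws L ↔ x ∈ ws ∧ lenK x = L := by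
  unfold bigblock
  rw [List.mem_flatMap]
  constructor
  · rintro ⟨c, _, hx⟩
    have := mem_bucketOf.mp hx
    exact ⟨this.1, this.2.1⟩
  · rintro ⟨hx, hL⟩
    exact ⟨iniK x, mem_inisOf.mpr ⟨x, hx, hL, rfl⟩, mem_bucketOf.mpr ⟨hx, hL, rfl⟩⟩

theorem bucketOf_ne_nil {ws : List String} {L : Int} {c : String} (h : c ∈ inisOf ws L) :
    bucketOf ws L c ≠ [] := by
  obtain ⟨w, hw, hL, hc⟩ := mem_inisOf.mp h
  exact List.ne_nil_of_mem (mem_bucketOf.mpr ⟨hw, hL, hc⟩)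

theorem bigblock_ne_nil {ws : List String} {L : Int} (h : L ∈ lensOf ws) :
    bigblock ws L ≠ [] := by
  obtain ⟨w, hw, hL⟩ := mem_lensOf.mp h
  exact List.ne_nil_of_mem (mem_bigblock.mpr ⟨hw, hL⟩)

theorem bucketOf_pairwise (ws : List String) (L : Int) (c : String) :
    (bucketOf ws L c).Pairwise
      (fun a b => toLex (lenK a, a) < toLex (lenK b, b)) := by
  unfold bucketOf
  apply (PySem.List.sorted_ofList_pairwise_lt _).imp_of_mem
  intro a b ha hb hab
  have ha' := mem_bucketOf.mp (by rw [bucketOf] at *; exact ha)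
  have hb' := mem_bucketOf.mp (by rw [bucketOf] at *; exact hb)
  rw [Prod.Lex.lt_iff]
  right
  exact ⟨by rw [ha'.2.1, hb'.2.1]; rfl, hab⟩

theorem bigblock_pairwise (ws : List String) (L : Int)
    (hne : ∀ w ∈ ws, w ≠ "") :
    (bigblock ws L).Pairwise (fun a b => toLex (lenK a, a) < toLex (lenK b, b)) := by
  unfold bigblock
  rw [List.flatMap_def, List.pairwise_flatten]
  constructor
  · intro l hl
    obtain ⟨c, _, rfl⟩ := List.mem_map.mp hl
    exact bucketOf_pairwise ws L c
  · rw [List.pairwise_map]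
    apply (PySem.List.sorted_ofList_pairwise_lt _).imp_of_mem
    intro c1 c2 hc1 hc2 hlt x hx y hy
    have hx' := mem_bucketOf.mp hx
    have hy' := mem_bucketOf.mp hy
    rw [Prod.Lex.lt_iff]
    right
    refine ⟨by rw [hx'.2.1, hy'.2.1]; rfl, ?_⟩
    apply str_lt_of_iniK_lt x y (hne x hx'.1) (hne y hy'.1)
    rw [hx'.2.2, hy'.2.2]
    exact hlt

theorem flatC_pairwise (ws : List String) (hne : ∀ w ∈ ws, w ≠ "") :
    (flatC ws).Pairwise (fun a b => toLex (lenK a, a) < toLex (lenK b, b)) := by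
  unfold flatC
  rw [List.flatMap_def, List.pairwise_flatten]
  constructor
  · intro l hl
    obtain ⟨L, _, rfl⟩ := List.mem_map.mp hl
    exact bigblock_pairwise ws L hne
  · rw [List.pairwise_map]
    apply (PySem.List.sorted_ofList_pairwise_lt _).imp_of_mem
    intro L1 L2 _ _ hlt x hx y hy
    have hx' := mem_bigblock.mp hx
    have hy' := mem_bigblock.mp hy
    rw [Prod.Lex.lt_iff]
    left
    rw [hx'.2, hy'.2]
    exact hlt

theorem flatC_nodup (ws : List String) (hne : ∀ w ∈ ws, w ≠ "") : (flatC ws).Nodup :=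
  (flatC_pairwise ws hne).imp (fun h => by
    intro hc; subst hc; exact lt_irrefl _ h)

theorem mem_flatC {ws : List String} {x : String} : x ∈ flatC ws ↔ x ∈ ws := by
  unfold flatC
  rw [List.mem_flatMap]
  constructor
  · rintro ⟨L, _, hx⟩
    exact (mem_bigblock.mp hx).1
  · intro hx
    exact ⟨lenK x, mem_lensOf.mpr ⟨x, hx, rfl⟩, mem_bigblock.mpr ⟨hx, rfl⟩⟩

theorem flat_eq (ws : List String) (hne : ∀ w ∈ ws, w ≠ "") :
    PySem.List.sorted (PySem.Set.ofList ws) (fun w => toLex (lenK w, w)) false = flatC ws := by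
  apply PySem.List.sorted_eq_of_perm_of_pairwise_lt
  · rw [List.perm_ext_iff_of_nodup (flatC_nodup ws hne) (PySem.Set.nodup_ofList ws)]
    intro a
    rw [mem_flatC, PySem.Set.mem_ofList]
  · exact flatC_pairwise ws hne

def gB2 (inner : PySem.Dict String (List String)) (w : String) :
    PySem.Dict String (List String) :=
  inner.insert (iniK w) (inner.getD (iniK w) [] ++ [w])

def gB (index : PySem.Dict Int (PySem.Dict String (List String))) (w : String) :
    PySem.Dict Int (PySem.Dict String (List String)) :=
  index.insert (lenK w) (gB2 (index.getD (lenK w) PySem.Dict.empty) w)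

theorem lensOf_nodup (ws : List String) : (lensOf ws).Nodup := nodup_sorted_ofList _
theorem inisOf_nodup (ws : List String) (L : Int) : (inisOf ws L).Nodup := nodup_sorted_ofList _

theorem B_index_getD (ws : List String) (L : Int) (hL : L ∈ lensOf ws) :
    ((flatC ws).foldl gB PySem.Dict.empty).getD L PySem.Dict.empty
      = (bigblock ws L).foldl gB2 PySem.Dict.empty := by
  unfold gB
  rw [getD_foldl_insert_key_filter (flatC ws) lenK gB2 PySem.Dict.empty PySem.Dict.empty L,
    PySem.Dict.getD_empty]
  unfold flatC
  rw [filter_flatMap_groups (lensOf ws) (fun L => bigblock ws L) lenK L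
    (lensOf_nodup ws) (fun L' hL' x hx => (mem_bigblock.mp hx).2) hL]

theorem B_index_keys (ws : List String) :
    ((flatC ws).foldl gB PySem.Dict.empty).keys = lensOf ws := by
  unfold gB
  rw [PySem.Dict.keys_foldl_insert_key (flatC ws) lenK
    (fun d w => gB2 (d.getD (lenK w) PySem.Dict.empty) w) PySem.Dict.empty]
  show PySem.Set.update ([] : PySem.Set Int) ((flatC ws).map lenK) = _
  rw [PySem.Set.update_nil_left]
  unfold flatC
  exact ofList_map_key_flatMap (lensOf ws) (fun L => bigblock ws L) lenK
    (lensOf_nodup ws) (fun L hL => bigblock_ne_nil hL)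
    (fun L _ x hx => (mem_bigblock.mp hx).2)

theorem B_inner_getD (ws : List String) (L : Int) (c : String) (hc : c ∈ inisOf ws L) :
    ((bigblock ws L).foldl gB2 PySem.Dict.empty).getD c [] = bucketOf ws L c := by
  unfold gB2
  rw [getD_foldl_insert_key_filter (bigblock ws L) iniK
    (fun l w => l ++ [w]) [] PySem.Dict.empty c, PySem.Dict.getD_empty]
  unfold bigblock
  rw [filter_flatMap_groups (inisOf ws L) (fun c => bucketOf ws L c) iniK c
    (inisOf_nodup ws L) (fun c' hc' x hx => (mem_bucketOf.mp hx).2.2) hc]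
  rw [PySem.List.foldl_append_singleton_eq_self, List.nil_append]

theorem B_inner_keys (ws : List String) (L : Int) :
    ((bigblock ws L).foldl gB2 PySem.Dict.empty).keys = inisOf ws L := by
  unfold gB2
  rw [PySem.Dict.keys_foldl_insert_key (bigblock ws L) iniK
    (fun d w => d.getD (iniK w) [] ++ [w]) PySem.Dict.empty]
  show PySem.Set.update ([] : PySem.Set String) ((bigblock ws L).map iniK) = _
  rw [PySem.Set.update_nil_left]
  unfold bigblock
  exact ofList_map_key_flatMap (inisOf ws L) (fun c => bucketOf ws L c) iniK
    (inisOf_nodup ws L) (fun c hc => bucketOf_ne_nil hc)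
    (fun c _ x hx => (mem_bucketOf.mp hx).2.2)

theorem B_eq_canon (words : List String) :
    build_sorted_index_alt words = canon (nws words) := by
  simp only [build_sorted_index_alt]
  rw [show ((words.map (fun word => PySem.Str.lower word)).filter
      (fun w => decide (w ≠ ""))) = nws words from rfl]
  rw [sorted2_eq_sorted_lexKey, flat_eq (nws words) (fun w hw => mem_nws_ne hw)]
  show ((flatC (nws words)).foldl gB PySem.Dict.empty).items.map (fun p => (p.1, p.2.items))
    = canon (nws words)
  have hnodup : ((flatC (nws words)).foldl gB PySem.Dict.empty).keys.Nodup := by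
    rw [B_index_keys]; exact lensOf_nodup _
  rw [PySem.Dict.items_eq_map_keys _ hnodup PySem.Dict.empty, B_index_keys, List.map_map]
  unfold canon
  apply List.map_congr_left
  intro L hL
  simp only [Function.comp]
  refine congrArg (fun z => (L, z)) ?_
  rw [B_index_getD (nws words) L hL]
  have hnodup2 : ((bigblock (nws words) L).foldl gB2 PySem.Dict.empty).keys.Nodup := by
    rw [B_inner_keys]; exact inisOf_nodup _ _
  rw [PySem.Dict.items_eq_map_keys _ hnodup2 [], B_inner_keys]
  apply List.map_congr_left
  intro c hc
  refine congrArg (fun z => (c, z)) ?_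
  exact B_inner_getD (nws words) L c hc

-- ===== VERDICT (by name: the statement is the Claim_ definition above) =====
theorem build_sorted_index_spec : Claim_equal_build_sorted_index := by
  intro words _
  unfold Spec_build_sorted_index
  rw [A_eq_canon, B_eq_canon]
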